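-- pv_equiv track=rewrite | github.com/tdayris/snakemake-wrappers | bio/BiGR/split_vcf_multiallelic/wrapper.py | split_info
-- ===== SOURCE A (Python) =====
-- def split_info(info: str, allele_nb: int) -> list[str]:
--     """
--     Split multiallelic info field
--     """
--     splitted = [[] for _ in range(allele_nb)]
--     for info_field in info.split(";"):
--         try:
--             # The field has a key=val structure
--             name, values = info_field.split("=")
--         except ValueError:
--             # The field has no name, it is a simple flag
--             name = ""
--             values = info_field
--
--         # Remove empty fields
--         # values = list(filter(lambda x: x != "", values.split(",")))
--         values = [i for i in values.split(",") if i != ""]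
--         if len(values) == allele_nb:
--             # The field has one value per allele
--             for idx, value in enumerate(values):
--                 splitted[idx] += [f"{name}={value}" if name != "" else value]
--         else:
--             # The field has one value for all alleles
--             for idx in range(allele_nb):
--                 splitted[idx] += [
--                     f"{name}={';'.join(values)}"
--                     if name != ""
--                     else ";".join(values)
--                 ]
--
--     return splitted
-- ===== SOURCE B (Python) =====
-- def split_info(info: str, allele_nb: int) -> list[str]:
--     """
--     Split multiallelic info field.
--     Different algorithm: build ONE shared column template plus a patch list of
--     per-allele slots, then stamp out each allele's column by copying the
--     template and filling the patched positions with that allele's value.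
--     """
--     template = []   # one entry per `;`-field; None marks a per-allele slot
--     patches = []    # (position in template, list of allele_nb formatted strings)
--     for field in info.split(";"):
--         parts = field.split("=")
--         name, values = (parts[0], parts[1]) if len(parts) == 2 else ("", field)
--         vals = [v for v in values.split(",") if v != ""]
--         if len(vals) == allele_nb:
--             patches.append((len(template), [f"{name}={v}" if name else v for v in vals]))
--             template.append(None)
--         else:
--             joined = ";".join(vals)
--             template.append(f"{name}={joined}" if name else joined)
--     out = []
--     for j in range(allele_nb):
--         col = template[:]
--         for pos, per in patches:
--             col[pos] = per[j]
--         out.append(col)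
--     return out
-- ===== Notes on version B (the rewrite author's own statement) =====
-- stated objective: alternative
-- what changed: A accumulates per-allele buckets by mutating splitted[idx] inside two inner loops per field; B parses each field once into a shared column template plus a patch list of per-allele slots, then stamps out each allele's column by copying the template and filling only the patched positions.
import Mathlib
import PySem

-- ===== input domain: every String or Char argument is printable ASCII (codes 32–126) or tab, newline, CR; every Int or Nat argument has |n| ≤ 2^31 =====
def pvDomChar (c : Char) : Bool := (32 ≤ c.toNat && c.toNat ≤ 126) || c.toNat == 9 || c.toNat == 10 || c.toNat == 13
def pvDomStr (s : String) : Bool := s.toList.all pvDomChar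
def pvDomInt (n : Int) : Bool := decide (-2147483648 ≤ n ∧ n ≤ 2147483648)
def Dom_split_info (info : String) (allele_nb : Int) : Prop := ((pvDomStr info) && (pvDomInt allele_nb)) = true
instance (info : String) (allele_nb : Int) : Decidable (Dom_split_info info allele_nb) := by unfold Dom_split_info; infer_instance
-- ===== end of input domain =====

-- B replaces A's per-field bucket accumulation by a different algorithm: one shared column
-- TEMPLATE plus a PATCH list of per-allele slots, stamped out once per allele; objective:
-- alternative algorithm/data structure, same asymptotic cost.


-- A-side thin wrapper: s.split(sep) for a non-empty separator (split? is none only for sep = "")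
def pySplitA (s sep : String) : List String := (PySem.Str.split? s sep).getD []

-- ===== PORT A =====
-- one step of A's loop body: parse the field, then mutate splitted[idx] bucket by bucket
def split_info (info : String) (allele_nb : Int) : List (List String) :=
  let init : List (List String) := (PySem.List.pyRange 0 allele_nb 1).map (fun _ => [])
  (pySplitA info ";").foldl (fun splitted info_field =>
    -- try: name, values = info_field.split("="); except ValueError: name="", values=info_field
    let nv : String × String :=
      match pySplitA info_field "=" with
      | [n, v] => (n, v)
      | _ => ("", info_field)
    let name := nv.1
    let values := (pySplitA nv.2 ",").filter (fun i => i != "")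
    if (values.length : Int) = allele_nb then
      (PySem.List.enumerate values).foldl (fun s p =>
        s.modify p.1.toNat (fun col =>
          col ++ [if name != "" then name ++ "=" ++ p.2 else p.2])) splitted
    else
      (PySem.List.pyRange 0 allele_nb 1).foldl (fun s idx =>
        s.modify idx.toNat (fun col =>
          col ++ [if name != "" then name ++ "=" ++ PySem.Str.join ";" values
                  else PySem.Str.join ";" values])) splitted) init

-- ===== PORT B =====
-- B-side thin wrapper for s.split(sep), sep non-empty
def pvSplit (s sep : String) : List String := (PySem.Str.split? s sep).getD []

-- one step of B's template/patch building loop over the `;`-fields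
def pvStepB (n : Int) (tp : List (Option String) × List (Nat × List String)) (field : String) :
    List (Option String) × List (Nat × List String) :=
  let parts := pvSplit field "="
  -- name, values = (parts[0], parts[1]) if len(parts) == 2 else ("", field); indices in range there
  let nv : String × String :=
    if parts.length = 2 then (parts.getD 0 "", parts.getD 1 "") else ("", field)
  let name := nv.1
  let vals := (pvSplit nv.2 ",").filter (fun i => i != "")
  if (vals.length : Int) = n then
    (tp.1 ++ [none],
     tp.2 ++ [(tp.1.length, vals.map (fun v => if name != "" then name ++ "=" ++ v else v))])
  else
    let joined := PySem.Str.join ";" vals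
    (tp.1 ++ [some (if name != "" then name ++ "=" ++ joined else joined)], tp.2)

-- stamp out allele j's column: copy the template, overwrite each patched slot with per[j]
-- (per[j] is in range: every patch list has length allele_nb, so pyGetD is exact here; every
-- none slot carries a patch, so the final Option.getD "" never sees a none)
def pvColB (tp : List (Option String) × List (Nat × List String)) (j : Int) : List String :=
  (tp.2.foldl (fun c q => c.set q.1 (some (PySem.List.pyGetD q.2 j ""))) tp.1).map
    (fun o => o.getD "")

def split_info_alt (info : String) (allele_nb : Int) : List (List String) :=
  let st := (pvSplit info ";").foldl (pvStepB allele_nb) ([], [])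
  (PySem.List.pyRange 0 allele_nb 1).map (fun j => pvColB st j)

-- ===== PRECONDITION & SPEC =====
def Spec_split_info (info : String) (allele_nb : Int) (out : List (List String)) : Prop := out = split_info_alt info allele_nb
instance (info : String) (allele_nb : Int) (out : List (List String)) : Decidable (Spec_split_info info allele_nb out) := by unfold Spec_split_info; infer_instance

-- ===== CLAIM (what is proved, stated in full; the proofs are below) =====
def Claim_equal_split_info : Prop := ∀ (info : String) (allele_nb : Int), Dom_split_info info allele_nb → Spec_split_info info allele_nb (split_info info allele_nb)

-- ===== LEMMAS AND PROOFS =====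

-- proof-side helper: the string field f contributes to allele j's column
def pvRowOf (allele_nb : Int) (field : String) : List String :=
  let parts := pvSplit field "="
  let nv : String × String :=
    if parts.length = 2 then (parts.getD 0 "", parts.getD 1 "") else ("", field)
  let name := nv.1
  let vals := (pvSplit nv.2 ",").filter (fun i => i != "")
  if (vals.length : Int) = allele_nb then
    vals.map (fun v => if name != "" then name ++ "=" ++ v else v)
  else
    let joined := PySem.Str.join ";" vals
    List.replicate allele_nb.toNat (if name != "" then name ++ "=" ++ joined else joined)

-- the two thin split wrappers are definitionally the same function
theorem pvSplit_eq (s sep : String) : pvSplit s sep = pySplitA s sep := rfl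

-- B's length-2 test picks out exactly A's successful two-element unpacking
theorem pvNv_eq (parts : List String) (d : String × String) :
    (if parts.length = 2 then (parts.getD 0 "", parts.getD 1 "") else d) =
    (match parts with | [a, v] => (a, v) | _ => d) := by
  match parts with
  | [] => rfl
  | [a] => rfl
  | [a, v] => rfl
  | a :: b :: c :: t => rfl

-- getD through modify, at an in-range index
theorem pvGetD_modify (s : List (List String)) (i j : Nat) (f : List String → List String)
    (hj : j < s.length) :
    (s.modify i f).getD j [] = if i = j then f (s.getD j []) else s.getD j [] := by
  simp [List.getD_eq_getElem?_getD, List.getElem?_modify, List.getElem?_eq_getElem hj]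

-- A's enumerate-modify loop, characterised pointwise
theorem pvEnumFold_spec (g : String → String) :
    ∀ (vs : List String) (k : Nat) (s : List (List String)),
    k + vs.length ≤ s.length →
    (((PySem.List.enumerate vs (k : Int)).foldl
      (fun s p => s.modify p.1.toNat (fun col => col ++ [g p.2])) s).length = s.length ∧
    ∀ j : Nat, j < s.length →
      ((PySem.List.enumerate vs (k : Int)).foldl
        (fun s p => s.modify p.1.toNat (fun col => col ++ [g p.2])) s).getD j [] =
        if k ≤ j ∧ j < k + vs.length
        then s.getD j [] ++ [g (vs.getD (j - k) "")]
        else s.getD j []) := by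
  intro vs
  induction vs with
  | nil =>
    intro k s _
    refine ⟨rfl, fun j hj => ?_⟩
    simp only [PySem.List.enumerate_nil, List.foldl_nil]
    rw [if_neg (by simp only [List.length_nil]; omega)]
  | cons v tl ih =>
    intro k s hlen
    rw [PySem.List.enumerate_cons]
    simp only [List.foldl_cons]
    have hk1 : ((k : Int) + 1) = ((k + 1 : Nat) : Int) := by push_cast; ring
    set s' := s.modify ((k : Int)).toNat (fun col => col ++ [g v]) with hs'
    have hlen' : s'.length = s.length := by simp [hs', List.length_modify]
    have hsub : (k + 1) + tl.length ≤ s'.length := by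
      simp only [hlen']; simp at hlen; omega
    have hmain := ih (k + 1) s' hsub
    rw [hk1]
    refine ⟨by rw [hmain.1, hlen'], fun j hj => ?_⟩
    rw [hmain.2 j (by omega)]
    have hgd : s'.getD j [] = if k = j then s.getD j [] ++ [g v] else s.getD j [] := by
      rw [hs']
      have : ((k : Int)).toNat = k := by omega
      rw [this]
      exact pvGetD_modify s k j _ hj
    by_cases h1 : k + 1 ≤ j ∧ j < k + 1 + tl.length
    · rw [if_pos h1, hgd, if_neg (by omega), if_pos (by simp; omega)]
      have : j - k = (j - (k + 1)) + 1 := by omega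
      rw [this]
      simp
    · rw [if_neg h1, hgd]
      by_cases h2 : k = j
      · rw [if_pos h2, if_pos (by simp; omega)]
        subst h2
        simp
      · rw [if_neg h2, if_neg (by simp; omega)]

-- A's range-modify loop (constant value), characterised pointwise
theorem pvRangeFold_spec (x : String) :
    ∀ (m : Nat) (a n : Int), (n - a).toNat = m → ∀ (s : List (List String)), 0 ≤ a →
    n.toNat ≤ s.length →
    (((PySem.List.pyRange a n 1).foldl
      (fun s idx => s.modify idx.toNat (fun col => col ++ [x])) s).length = s.length ∧
    ∀ j : Nat, j < s.length →
      ((PySem.List.pyRange a n 1).foldl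
        (fun s idx => s.modify idx.toNat (fun col => col ++ [x])) s).getD j [] =
        if a ≤ (j : Int) ∧ (j : Int) < n
        then s.getD j [] ++ [x] else s.getD j []) := by
  intro m
  induction m with
  | zero =>
    intro a n hm s ha hn
    rw [PySem.List.pyRange_one_eq_nil (by omega)]
    refine ⟨rfl, fun j hj => ?_⟩
    simp only [List.foldl_nil]
    rw [if_neg (by omega)]
  | succ m ih =>
    intro a n hm s ha hn
    rw [PySem.List.pyRange_one_cons (by omega)]
    simp only [List.foldl_cons]
    set s' := s.modify a.toNat (fun col => col ++ [x]) with hs'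
    have hlen' : s'.length = s.length := by simp [hs', List.length_modify]
    have hmain := ih (a + 1) n (by omega) s' (by omega) (by omega)
    refine ⟨by rw [hmain.1, hlen'], fun j hj => ?_⟩
    rw [hmain.2 j (by omega)]
    have hgd : s'.getD j [] = if a.toNat = j then s.getD j [] ++ [x] else s.getD j [] := by
      rw [hs']; exact pvGetD_modify s a.toNat j _ hj
    by_cases h1 : a + 1 ≤ (j : Int) ∧ (j : Int) < n
    · rw [if_pos h1, hgd, if_neg (by omega), if_pos (by omega)]
    · rw [if_neg h1, hgd]
      by_cases h2 : a.toNat = j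
      · rw [if_pos h2, if_pos (by omega)]
      · rw [if_neg h2, if_neg (by omega)]

-- the whole field loop of A, against the per-field rows
theorem pvFold_spec (n : Int) :
    ∀ (fs : List String) (s : List (List String)), s.length = n.toNat →
    ((fs.foldl (fun splitted info_field =>
      let nv : String × String :=
        match pySplitA info_field "=" with
        | [a, v] => (a, v)
        | _ => ("", info_field)
      let name := nv.1
      let values := (pySplitA nv.2 ",").filter (fun i => i != "")
      if (values.length : Int) = n then
        (PySem.List.enumerate values).foldl (fun s p =>
          s.modify p.1.toNat (fun col =>
            col ++ [if name != "" then name ++ "=" ++ p.2 else p.2])) splitted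
      else
        (PySem.List.pyRange 0 n 1).foldl (fun s idx =>
          s.modify idx.toNat (fun col =>
            col ++ [if name != "" then name ++ "=" ++ PySem.Str.join ";" values
                    else PySem.Str.join ";" values])) splitted) s).length = n.toNat ∧
    ∀ j : Nat, j < n.toNat →
      (fs.foldl (fun splitted info_field =>
        let nv : String × String :=
          match pySplitA info_field "=" with
          | [a, v] => (a, v)
          | _ => ("", info_field)
        let name := nv.1
        let values := (pySplitA nv.2 ",").filter (fun i => i != "")
        if (values.length : Int) = n then
          (PySem.List.enumerate values).foldl (fun s p =>
            s.modify p.1.toNat (fun col =>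
              col ++ [if name != "" then name ++ "=" ++ p.2 else p.2])) splitted
        else
          (PySem.List.pyRange 0 n 1).foldl (fun s idx =>
            s.modify idx.toNat (fun col =>
              col ++ [if name != "" then name ++ "=" ++ PySem.Str.join ";" values
                      else PySem.Str.join ";" values])) splitted) s).getD j [] =
        s.getD j [] ++ (fs.map (pvRowOf n)).map (fun row => row.getD j "")) := by
  intro fs
  induction fs with
  | nil => intro s hs; exact ⟨hs, fun j hj => by simp⟩
  | cons f tl ih =>
    intro s hs
    simp only [List.foldl_cons, List.map_cons]
    set nv : String × String :=
      match pySplitA f "=" with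
      | [a, v] => (a, v)
      | _ => ("", f) with hnv
    set name := nv.1 with hname
    set values := (pySplitA nv.2 ",").filter (fun i => i != "") with hvals
    by_cases hc : (values.length : Int) = n
    · -- one value per allele: the enumerate loop
      simp only [if_pos hc]
      have henum := pvEnumFold_spec
        (fun v => if name != "" then name ++ "=" ++ v else v) values 0 s
        (by simp; omega)
      set s' := (PySem.List.enumerate values (0 : Int)).foldl
        (fun s p => s.modify p.1.toNat (fun col =>
          col ++ [if name != "" then name ++ "=" ++ p.2 else p.2])) s with hs'def
      have hlen' : s'.length = n.toNat := henum.1.trans hs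
      have hmain := ih s' hlen'
      refine ⟨hmain.1, fun j hj => ?_⟩
      rw [hmain.2 j hj]
      have hrow : (pvRowOf n f).getD j "" =
          (if name != "" then name ++ "=" ++ values.getD j "" else values.getD j "") := by
        simp only [pvRowOf, pvSplit_eq, pvNv_eq, ← hnv, ← hname, ← hvals, if_pos hc]
        have hjv : j < values.length := by omega
        rw [List.getD_eq_getElem _ _ (by simpa using hjv), List.getElem_map,
          List.getD_eq_getElem _ _ hjv]
      have hs'gd : s'.getD j [] = s.getD j [] ++ [(pvRowOf n f).getD j ""] := by
        have h2 := henum.2 j (by omega)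
        rw [if_pos ⟨Nat.zero_le _, by omega⟩] at h2
        simp only [Nat.sub_zero] at h2
        rw [hrow]
        exact h2
      rw [hs'gd]
      simp
    · -- one value for all alleles: the range loop
      simp only [if_neg hc]
      have hrange := pvRangeFold_spec
        (if name != "" then name ++ "=" ++ PySem.Str.join ";" values
         else PySem.Str.join ";" values) n.toNat 0 n (by omega) s (le_refl 0) (by omega)
      set s' := (PySem.List.pyRange 0 n 1).foldl
        (fun s idx => s.modify idx.toNat (fun col =>
          col ++ [if name != "" then name ++ "=" ++ PySem.Str.join ";" values
                  else PySem.Str.join ";" values])) s with hs'def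
      have hlen' : s'.length = n.toNat := hrange.1.trans hs
      have hmain := ih s' hlen'
      refine ⟨hmain.1, fun j hj => ?_⟩
      rw [hmain.2 j hj]
      have hrow : (pvRowOf n f).getD j "" =
          (if name != "" then name ++ "=" ++ PySem.Str.join ";" values
           else PySem.Str.join ";" values) := by
        simp only [pvRowOf, pvSplit_eq, pvNv_eq, ← hnv, ← hname, ← hvals, if_neg hc]
        rw [List.getD_eq_getElem _ _ (by simpa using hj), List.getElem_replicate]
      have hs'gd : s'.getD j [] = s.getD j [] ++ [(pvRowOf n f).getD j ""] := by
        have h2 := hrange.2 j (by omega)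
        rw [if_pos ⟨by omega, by omega⟩] at h2
        rw [hrow]
        exact h2
      rw [hs'gd]
      simp

-- initial buckets are all empty
theorem pvInit_getD (n : Int) (j : Nat) :
    ((PySem.List.pyRange 0 n 1).map (fun _ => ([] : List String))).getD j [] = [] := by
  rw [List.getD_eq_getElem?_getD, List.getElem?_map]
  cases (PySem.List.pyRange 0 n 1)[j]? <;> rfl

-- ===== B-side lemmas: the template/patch algorithm stamps out the same columns =====

-- applying the patches keeps the template length
theorem pvAppP_length (j : Int) :
    ∀ (p : List (Nat × List String)) (t : List (Option String)),
    (p.foldl (fun c q => c.set q.1 (some (PySem.List.pyGetD q.2 j ""))) t).length = t.length := by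
  intro p
  induction p with
  | nil => intro t; rfl
  | cons q tl ih => intro t; simp only [List.foldl_cons]; rw [ih]; simp

-- patches with positions inside t do not touch an appended slot
theorem pvAppP_append (j : Int) :
    ∀ (p : List (Nat × List String)) (t : List (Option String)) (x : Option String),
    (∀ q ∈ p, q.1 < t.length) →
    (p.foldl (fun c q => c.set q.1 (some (PySem.List.pyGetD q.2 j ""))) (t ++ [x])) =
    (p.foldl (fun c q => c.set q.1 (some (PySem.List.pyGetD q.2 j ""))) t) ++ [x] := by
  intro p
  induction p with
  | nil => intro t x _; rfl
  | cons q tl ih =>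
    intro t x hp
    simp only [List.foldl_cons]
    rw [List.set_append_left _ _ (hp q (by simp))]
    exact ih _ x (fun r hr => by
      have := hp r (by simp [hr]); simpa using this)

-- the column of allele j after one B step
theorem pvColB_step (n : Int) (t : List (Option String)) (p : List (Nat × List String))
    (f : String) (hp : ∀ q ∈ p, q.1 < t.length) (j : Nat) (hj : j < n.toNat) :
    pvColB (pvStepB n (t, p) f) (j : Int) =
      pvColB (t, p) (j : Int) ++ [(pvRowOf n f).getD j ""] := by
  simp only [pvStepB, pvRowOf, pvColB]
  set parts := pvSplit f "=" with hparts
  set nv : String × String :=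
    if parts.length = 2 then (parts.getD 0 "", parts.getD 1 "") else ("", f) with hnv
  set name := nv.1 with hname
  set vals := (pvSplit nv.2 ",").filter (fun i => i != "") with hvals
  set fmt := fun v => if name != "" then name ++ "=" ++ v else v with hfmt
  by_cases hc : (vals.length : Int) = n
  · simp only [if_pos hc]
    rw [List.foldl_append]
    simp only [List.foldl_cons, List.foldl_nil]
    rw [pvAppP_append (j : Int) p t none hp]
    set l := p.foldl (fun c q => c.set q.1 (some (PySem.List.pyGetD q.2 (j : Int) ""))) t with hl
    have hlen : l.length = t.length := pvAppP_length (j : Int) p t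
    rw [← hlen, List.set_append_right _ _ (le_refl _)]
    simp only [Nat.sub_self, List.set_cons_zero, List.map_append, List.map_cons, List.map_nil]
    have hjlt : j < (vals.map fmt).length := by simp; omega
    rw [PySem.List.pyGetD_natCast, List.getD_eq_getElem _ _ hjlt]
    simp
  · simp only [if_neg hc]
    rw [pvAppP_append (j : Int) p t _ hp]
    rw [List.map_append]
    congr 1
    simp only [List.map_cons, List.map_nil, Option.getD_some]
    rw [List.getD_eq_getElem _ _ (by simpa using hj), List.getElem_replicate]

-- each B step keeps every patch position inside the template
theorem pvStepB_inv (n : Int) (t : List (Option String)) (p : List (Nat × List String))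
    (f : String) (hp : ∀ q ∈ p, q.1 < t.length) :
    ∀ q ∈ (pvStepB n (t, p) f).2, q.1 < (pvStepB n (t, p) f).1.length := by
  simp only [pvStepB]
  set parts := pvSplit f "=" with hparts
  set nv : String × String :=
    if parts.length = 2 then (parts.getD 0 "", parts.getD 1 "") else ("", f) with hnv
  set vals := (pvSplit nv.2 ",").filter (fun i => i != "") with hvals
  by_cases hc : (vals.length : Int) = n
  · simp only [if_pos hc]
    intro q hq
    simp only [List.mem_append, List.mem_singleton] at hq
    rcases hq with hq | hq
    · have := hp q hq; simp; omega
    · subst hq; simp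
  · simp only [if_neg hc]
    intro q hq
    have := hp q hq
    simp; omega

-- B's whole building loop, column by column
theorem pvBuild_spec (n : Int) :
    ∀ (fs : List String) (t : List (Option String)) (p : List (Nat × List String)),
    (∀ q ∈ p, q.1 < t.length) →
    ((∀ q ∈ (fs.foldl (pvStepB n) (t, p)).2, q.1 < (fs.foldl (pvStepB n) (t, p)).1.length) ∧
     ∀ j : Nat, j < n.toNat →
       pvColB (fs.foldl (pvStepB n) (t, p)) (j : Int) =
         pvColB (t, p) (j : Int) ++ (fs.map (pvRowOf n)).map (fun r => r.getD j "")) := by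
  intro fs
  induction fs with
  | nil => intro t p hp; exact ⟨hp, fun j hj => by simp⟩
  | cons f tl ih =>
    intro t p hp
    simp only [List.foldl_cons, List.map_cons]
    have hinv := pvStepB_inv n t p f hp
    have hnext := ih (pvStepB n (t, p) f).1 (pvStepB n (t, p) f).2 hinv
    refine ⟨by simpa using hnext.1, fun j hj => ?_⟩
    have h1 := hnext.2 j hj
    simp only [Prod.mk.eta] at h1 ⊢
    rw [h1, pvColB_step n t p f hp j hj]
    simp

-- ===== VERDICT (by name: the statement is the Claim_ definition above) =====
theorem split_info_spec : Claim_equal_split_info := by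
  intro info n _
  show split_info info n = split_info_alt info n
  simp only [split_info, split_info_alt]
  have hinit : ((PySem.List.pyRange 0 n 1).map
      (fun _ => ([] : List String))).length = n.toNat := by
    simp [PySem.List.length_pyRange_one]
  have hA := pvFold_spec n (pySplitA info ";") _ hinit
  have hB := pvBuild_spec n (pvSplit info ";") [] [] (by simp)
  apply List.ext_getElem
  · rw [hA.1]
    simp [PySem.List.length_pyRange_one]
  · intro k hk1 hk2
    have hkn : k < n.toNat := by rw [hA.1] at hk1; exact hk1
    rw [List.getElem_map, PySem.List.getElem_pyRange_one]
    rw [← List.getD_eq_getElem _ [] hk1, hA.2 k hkn, pvInit_getD]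
    have hBk := hB.2 k hkn
    have hcol0 : pvColB (([] : List (Option String)), ([] : List (Nat × List String)))
        ((k : Nat) : Int) = [] := rfl
    rw [hcol0] at hBk
    simp only [List.nil_append] at hBk ⊢
    rw [show ((0 : Int) + k) = ((k : Nat) : Int) by omega, hBk, pvSplit_eq]
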